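-- pv_equiv track=rewrite | github.com/t-reppert/bitesofpy | 296/jagged_list.py | jagged_list
-- ===== SOURCE A (Python) =====
-- from typing import List
-- from itertools import zip_longest
--
-- def jagged_list(lst_of_lst: List[List[int]], fillvalue: int = 0) -> List[List[int]]:
--     joined = []
--     for l in lst_of_lst:
--         temp = ""
--         for z in l:
--             temp += str(z)
--         joined.append(temp)
--     z = zip_longest(*joined, fillvalue=fillvalue)
--     filled_z = zip(*z)
--     unzipped_list = list(filled_z)
--     final = []
--     for l in unzipped_list:
--         t = [int(i) for i in l]
--         final.append(t)
--     return final
-- ===== SOURCE B (Python) =====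
-- def jagged_list(lst_of_lst, fillvalue=0):
--     # Simpler: compute the max digit-string length once, then right-pad each row;
--     # no zip_longest / zip double transpose.
--     strings = [''.join(str(z) for z in l) for l in lst_of_lst]
--     longest = max((len(s) for s in strings), default=0)
--     return [[int(c) for c in s] + [int(fillvalue)] * (longest - len(s))
--             for s in strings]
-- ===== Notes on version B (the rewrite author's own statement) =====
-- stated objective: simpler
-- what changed: replaces A's zip_longest/zip double transpose over the joined digit strings by a single max-length computation followed by right-padding each row
-- outside the precondition, e.g. on jagged_list([[], []], 0): A returns [], B returns [[], []]
import Mathlib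
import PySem

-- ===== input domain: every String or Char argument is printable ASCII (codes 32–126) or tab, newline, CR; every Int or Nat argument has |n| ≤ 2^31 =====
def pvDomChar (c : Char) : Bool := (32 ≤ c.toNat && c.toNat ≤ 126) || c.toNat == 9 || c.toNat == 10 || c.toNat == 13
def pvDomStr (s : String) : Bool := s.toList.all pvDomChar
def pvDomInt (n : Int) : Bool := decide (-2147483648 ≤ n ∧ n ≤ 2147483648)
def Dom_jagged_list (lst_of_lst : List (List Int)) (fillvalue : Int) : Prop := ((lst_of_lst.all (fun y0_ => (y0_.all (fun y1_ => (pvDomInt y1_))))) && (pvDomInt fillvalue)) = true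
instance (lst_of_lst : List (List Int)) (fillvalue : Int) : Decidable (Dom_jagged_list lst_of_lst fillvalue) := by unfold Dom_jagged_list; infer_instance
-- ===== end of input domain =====

-- B replaces A's zip_longest/zip double transpose by max-length-then-pad (simpler, same cost).

-- ===== PORT A =====
-- Python strings are ported as List Char; the heterogeneous tuples produced by
-- zip_longest (chars of the joined strings mixed with the int fillvalue) are Sum Char Int.

-- int(i) where i is either a single char of a joined string or the int fillvalue;
-- on a non-digit char Python raises ValueError (excluded by Pre_), the port returns 0 there.
def pyIntOf (fillchar : Sum Char Int) : Int :=
  match fillchar with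
  | .inl c => (PySem.Int.ofChars? [c]).getD 0
  | .inr n => n

theorem sum_len_tail_le {α : Type} (rows : List (List α)) :
    ((rows.map List.tail).map List.length).sum ≤ (rows.map List.length).sum := by
  induction rows with
  | nil => simp
  | cons r rs ih => simp only [List.map_cons, List.sum_cons, List.length_tail]; omega

theorem sum_len_tail_lt {α : Type} (rows : List (List α)) (h : ¬ rows.all List.isEmpty) :
    ((rows.map List.tail).map List.length).sum < (rows.map List.length).sum := by
  induction rows with
  | nil => simp at h
  | cons r rs ih =>
    simp only [List.map_cons, List.sum_cons, List.length_tail]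
    by_cases hr : r = []
    · subst hr
      simp only [List.all_cons, List.isEmpty_nil, Bool.true_and] at h
      have := ih h
      simpa using this
    · have h1 : r.length ≠ 0 := by simpa using hr
      have h2 := sum_len_tail_le rs
      omega

-- itertools.zip_longest(*rows, fillvalue=fill): pull one element from each row,
-- substituting fill for exhausted rows, until all rows are exhausted.
def zipLongest {α : Type} (rows : List (List α)) (fill : α) : List (List α) :=
  if h : rows.all List.isEmpty then []
  else (rows.map (fun r => r.headD fill)) :: zipLongest (rows.map List.tail) fill
termination_by ((rows.map List.length).sum)
decreasing_by exact sum_len_tail_lt rows h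

-- zip(*rows): pull one element from each row until some row (or the argument list) is exhausted.
-- (rows are nonempty at the headD call; default is never used)
def pyZip {α : Type} [Inhabited α] (rows : List (List α)) : List (List α) :=
  if h : rows.isEmpty || rows.any List.isEmpty then []
  else (rows.map (fun r => r.headD default)) :: pyZip (rows.map List.tail)
termination_by ((rows.map List.length).sum)
decreasing_by
  apply sum_len_tail_lt
  intro hall
  apply h
  cases rows with
  | nil => simp
  | cons r rs =>
    simp only [List.all_cons, Bool.and_eq_true] at hall
    simp [List.any_cons, hall.1]

def jagged_list (lst_of_lst : List (List Int)) (fillvalue : Int) : List (List Int) :=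
  let joined := lst_of_lst.map (fun l =>
    l.foldl (fun temp z => temp ++ PySem.Int.toChars z) ([] : List Char))
  let z := zipLongest (joined.map (fun s => s.map Sum.inl)) (Sum.inr fillvalue)
  let filled_z := pyZip z
  filled_z.map (fun l => l.map pyIntOf)

-- ===== PORT B =====
-- int(c) for a single char c; non-digit chars (ValueError in Python) are excluded by Pre_.
def pyIntChar (c : Char) : Int := (PySem.Int.ofChars? [c]).getD 0

def jagged_list_alt (lst_of_lst : List (List Int)) (fillvalue : Int) : List (List Int) :=
  let strings := lst_of_lst.map (fun l => (l.map PySem.Int.toChars).flatten)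
  let longest := (strings.map List.length).foldl max 0
  -- int(fillvalue) is the identity on an int, ported as fillvalue
  strings.map (fun s => s.map pyIntChar ++ List.replicate (longest - s.length) fillvalue)

-- ===== PRECONDITION & SPEC =====
-- Pre_ excludes (a) inputs containing a negative number, on which Python A (and B) raise
-- ValueError (int('-')), and (b) nonempty inputs all of whose sublists are empty, a corner
-- where A's [] (the double transpose collapses) and B's list of empty rows are both defensible.
def Pre_jagged_list (lst_of_lst : List (List Int)) (fillvalue : Int) : Prop :=
  (∀ r ∈ lst_of_lst, ∀ z ∈ r, 0 ≤ z) ∧ (lst_of_lst = [] ∨ ∃ r ∈ lst_of_lst, r ≠ [])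
instance (lst_of_lst : List (List Int)) (fillvalue : Int) : Decidable (Pre_jagged_list lst_of_lst fillvalue) := by
  unfold Pre_jagged_list; infer_instance

def pvWitness_jagged_list : List (List Int) × Int := ([[1, 22], [3]], 0)

def Spec_jagged_list (lst_of_lst : List (List Int)) (fillvalue : Int) (out : List (List Int)) : Prop := out = jagged_list_alt lst_of_lst fillvalue
instance (lst_of_lst : List (List Int)) (fillvalue : Int) (out : List (List Int)) : Decidable (Spec_jagged_list lst_of_lst fillvalue out) := by unfold Spec_jagged_list; infer_instance

-- ===== CLAIM (what is proved, stated in full; the proofs are below) =====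
def Claim_equal_jagged_list : Prop := ∀ (lst_of_lst : List (List Int)) (fillvalue : Int), Dom_jagged_list lst_of_lst fillvalue → Pre_jagged_list lst_of_lst fillvalue → Spec_jagged_list lst_of_lst fillvalue (jagged_list lst_of_lst fillvalue)

-- ===== LEMMAS AND PROOFS =====

-- foldl max characterisations
theorem foldl_max_le_iff (l : List Nat) (a n : Nat) :
    l.foldl max a ≤ n ↔ a ≤ n ∧ ∀ x ∈ l, x ≤ n := by
  induction l generalizing a with
  | nil => simp
  | cons x t ih =>
    simp only [List.foldl_cons, ih, Nat.max_le, List.mem_cons]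
    constructor
    · rintro ⟨⟨h1, h2⟩, h3⟩
      refine ⟨h1, ?_⟩
      intro y hy
      rcases hy with rfl | hy
      · exact h2
      · exact h3 y hy
    · rintro ⟨h1, h2⟩
      exact ⟨⟨h1, h2 x (Or.inl rfl)⟩, fun y hy => h2 y (Or.inr hy)⟩

theorem le_foldl_max (l : List Nat) (x : Nat) (hx : x ∈ l) : x ≤ l.foldl max 0 :=
  ((foldl_max_le_iff l 0 (l.foldl max 0)).mp le_rfl).2 x hx

theorem foldl_max_sub_one (l : List Nat) (a : Nat) :
    (l.map (· - 1)).foldl max (a - 1) = (l.foldl max a) - 1 := by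
  induction l generalizing a with
  | nil => rfl
  | cons x t ih =>
    simp only [List.map_cons, List.foldl_cons]
    rw [show max (a - 1) (x - 1) = max a x - 1 by omega, ih]

theorem maxlen_map_tail {α : Type} (rows : List (List α)) :
    (((rows.map List.tail).map List.length).foldl max 0) = ((rows.map List.length).foldl max 0) - 1 := by
  have h : (rows.map List.tail).map List.length = (rows.map List.length).map (· - 1) := by
    simp [List.map_map, Function.comp_def, List.length_tail]
  rw [h, show (0 : Nat) = 0 - 1 by rfl, foldl_max_sub_one]

theorem getD_tail {α : Type} (r : List α) (i : Nat) (d : α) :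
    r.tail.getD i d = r.getD (i + 1) d := by cases r <;> simp

theorem headD_eq_getD {α : Type} (r : List α) (d : α) : r.headD d = r.getD 0 d := by
  cases r <;> simp

theorem getD_map_of_lt {α β : Type} (f : α → β) (l : List α) (j : Nat) (d : β) (h : j < l.length) :
    (l.map f).getD j d = f l[j] := by
  simp [List.getD, h]

-- zipLongest builds the columns 0 .. maxlen-1, padding each row with fill
theorem zipLongest_eq {α : Type} (n : Nat) :
    ∀ (rows : List (List α)) (fill : α), ((rows.map List.length).foldl max 0) = n →
    zipLongest rows fill = (List.range n).map (fun i => rows.map (fun r => r.getD i fill)) := by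
  induction n with
  | zero =>
    intro rows fill h
    have hall : rows.all List.isEmpty = true := by
      rw [List.all_eq_true]
      intro r hr
      have hle := le_foldl_max (rows.map List.length) r.length (List.mem_map.mpr ⟨r, hr, rfl⟩)
      rw [h] at hle
      cases r with
      | nil => rfl
      | cons a t => simp at hle
    rw [zipLongest]
    simp [hall]
  | succ n ih =>
    intro rows fill h
    have hnot : ¬ rows.all List.isEmpty = true := by
      intro hall
      rw [List.all_eq_true] at hall
      have : ((rows.map List.length).foldl max 0) ≤ 0 := by
        rw [foldl_max_le_iff]
        refine ⟨le_rfl, ?_⟩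
        intro x hx
        obtain ⟨r, hr, rfl⟩ := List.mem_map.mp hx
        have hre : r = [] := by simpa [List.isEmpty_iff] using hall r hr
        simp [hre]
      omega
    rw [zipLongest, dif_neg hnot]
    have htail : (((rows.map List.tail).map List.length).foldl max 0) = n := by
      rw [maxlen_map_tail, h]
      omega
    rw [ih (rows.map List.tail) fill htail]
    rw [List.range_succ_eq_map, List.map_cons, List.map_map]
    congr 1
    · apply List.map_congr_left; intro r _; exact headD_eq_getD r fill
    · apply List.map_congr_left
      intro i _
      simp only [Function.comp_def, List.map_map]
      apply List.map_congr_left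
      intro r _
      simpa using getD_tail r i fill

-- pyZip of a nonempty list of equal-length lists is the transpose
theorem pyZip_eq {α : Type} [Inhabited α] (n : Nat) :
    ∀ (cols : List (List α)), cols ≠ [] → (∀ c ∈ cols, c.length = n) →
    pyZip cols = (List.range n).map (fun j => cols.map (fun c => c.getD j default)) := by
  induction n with
  | zero =>
    intro cols hne hlen
    have hcond : (cols.isEmpty || cols.any List.isEmpty) = true := by
      cases cols with
      | nil => simp at hne
      | cons c cs =>
        have hc0 : c.length = 0 := hlen c (by simp)
        have hce : c = [] := by cases c with | nil => rfl | cons a t => simp at hc0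
        subst hce
        simp
    rw [pyZip, dif_pos hcond]
    simp
  | succ n ih =>
    intro cols hne hlen
    have hcond : ¬ (cols.isEmpty || cols.any List.isEmpty) = true := by
      simp only [Bool.or_eq_true, List.any_eq_true, not_or, not_exists]
      constructor
      · simpa [List.isEmpty_iff] using hne
      · intro c
        simp only [not_and]
        intro hc'
        have hl := hlen c hc'
        cases c with
        | nil => simp at hl
        | cons a t => simp
    rw [pyZip, dif_neg hcond]
    have htne : cols.map List.tail ≠ [] := by simpa using hne
    have htlen : ∀ c ∈ cols.map List.tail, c.length = n := by
      intro c hc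
      simp only [List.mem_map] at hc
      obtain ⟨c', hc', rfl⟩ := hc
      have := hlen c' hc'
      simp [List.length_tail, this]
    rw [ih (cols.map List.tail) htne htlen]
    rw [List.range_succ_eq_map, List.map_cons, List.map_map]
    congr 1
    · apply List.map_congr_left; intro c _; exact headD_eq_getD c default
    · apply List.map_congr_left
      intro j _
      simp only [Function.comp_def, List.map_map]
      apply List.map_congr_left
      intro c _
      simpa using getD_tail c j default

-- padding a row r to length L with fill
theorem pad_eq {α : Type} (r : List α) (L : Nat) (fill : α) (h : r.length ≤ L) :
    (List.range L).map (fun i => r.getD i fill) = r ++ List.replicate (L - r.length) fill := by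
  induction r generalizing L with
  | nil =>
    simp only [List.getD_nil, List.nil_append, List.length_nil, Nat.sub_zero]
    rw [List.map_const']
    simp
  | cons x r' ih =>
    cases L with
    | zero => simp at h
    | succ m =>
      rw [List.range_succ_eq_map, List.map_cons, List.map_map]
      simp only [List.getD_cons_zero, Function.comp_def, List.getD_cons_succ]
      rw [ih m (by simpa using h)]
      simp [List.cons_append, List.length_cons, Nat.succ_sub_succ]

-- A's string-building loop equals flatten-of-map
theorem foldl_append_toChars (l : List Int) (acc : List Char) :
    l.foldl (fun temp z => temp ++ PySem.Int.toChars z) acc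
      = acc ++ (l.map PySem.Int.toChars).flatten := by
  induction l generalizing acc with
  | nil => simp
  | cons z t ih => simp [ih, List.append_assoc]

theorem toChars_ne_nil (z : Int) : PySem.Int.toChars z ≠ [] := by
  have h1 : ∀ m : Nat, Nat.toDigits 10 m ≠ [] := by
    intro m
    have := Nat.length_toDigits_pos (b := 10) (n := m)
    intro hnil; rw [hnil] at this; simp at this
  unfold PySem.Int.toChars
  split <;> simp [h1]

theorem jagged_list_spec : Claim_equal_jagged_list := by
  intro lst fv _hdom hpre
  obtain ⟨_hnn, hne⟩ := hpre
  unfold Spec_jagged_list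
  rcases hne with hnil | ⟨r, hrmem, hrne⟩
  · subst hnil
    have hA : jagged_list [] fv = [] := by
      unfold jagged_list
      dsimp only
      simp only [List.map_nil]
      rw [zipLongest, dif_pos (by simp)]
      rw [pyZip, dif_pos (by simp)]
      simp
    have hB : jagged_list_alt [] fv = [] := by
      unfold jagged_list_alt
      dsimp only
      simp
    rw [hA, hB]
  · unfold jagged_list jagged_list_alt
    dsimp only
    have hjoined : lst.map (fun l => l.foldl (fun temp z => temp ++ PySem.Int.toChars z) ([] : List Char))
        = lst.map (fun l => (l.map PySem.Int.toChars).flatten) := by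
      apply List.map_congr_left; intro l _; simpa using foldl_append_toChars l []
    rw [hjoined]
    set S : List (List Char) := lst.map (fun l => (l.map PySem.Int.toChars).flatten) with hS
    set L : Nat := (S.map List.length).foldl max 0 with hL
    -- the nonempty sublist r gives a nonempty string, hence L ≥ 1
    have hsne : (r.map PySem.Int.toChars).flatten ≠ [] := by
      cases r with
      | nil => exact absurd rfl hrne
      | cons z t =>
        simp only [List.map_cons, List.flatten_cons, ne_eq]
        intro hh
        exact toChars_ne_nil z (List.append_eq_nil_iff.mp hh).1
    have hsmem : (r.map PySem.Int.toChars).flatten ∈ S := by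
      rw [hS]; exact List.mem_map.mpr ⟨r, hrmem, rfl⟩
    have hL1 : 1 ≤ L := by
      have hle := le_foldl_max (S.map List.length) ((r.map PySem.Int.toChars).flatten).length
        (List.mem_map_of_mem hsmem)
      have hne0 : 0 < ((r.map PySem.Int.toChars).flatten).length := List.length_pos_of_ne_nil hsne
      exact le_trans hne0 hle
    set rows : List (List (Sum Char Int)) := S.map (fun s => s.map Sum.inl) with hrows
    have hmaxrows : ((rows.map List.length).foldl max 0) = L := by
      rw [hrows, hL]
      congr 1
      simp [List.map_map, Function.comp_def]
    rw [zipLongest_eq L rows (Sum.inr fv) hmaxrows]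
    have hcolsne : (List.range L).map (fun i => rows.map (fun rr => rr.getD i (Sum.inr fv))) ≠ [] := by
      simp only [ne_eq, List.map_eq_nil_iff, List.range_eq_nil]
      omega
    have hcolslen : ∀ c ∈ (List.range L).map (fun i => rows.map (fun rr => rr.getD i (Sum.inr fv))),
        c.length = rows.length := by
      intro c hc
      obtain ⟨i, _, rfl⟩ := List.mem_map.mp hc
      simp
    rw [pyZip_eq rows.length _ hcolsne hcolslen]
    apply List.ext_getElem
    · simp [hrows]
    · intro j hj1 hj2
      have hjrows : j < rows.length := by simpa [hrows] using hj2
      have hjS : j < S.length := by simpa [hrows] using hjrows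
      simp only [List.getElem_map, List.getElem_range]
      have hcols : (((List.range L).map (fun i => rows.map (fun rr => rr.getD i (Sum.inr fv)))).map
            (fun c => c.getD j default))
          = (List.range L).map (fun i => rows[j].getD i (Sum.inr fv)) := by
        rw [List.map_map]
        apply List.map_congr_left
        intro i _
        exact getD_map_of_lt (fun rr => rr.getD i (Sum.inr fv)) rows j default hjrows
      rw [hcols]
      have hrj : rows[j] = (S[j]'hjS).map Sum.inl := by simp [hrows]
      have hlenle : (S[j]'hjS).length ≤ L :=
        le_foldl_max (S.map List.length) _ (List.mem_map_of_mem (List.getElem_mem hjS))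
      have hlen : rows[j].length ≤ L := by rw [hrj]; simpa using hlenle
      rw [pad_eq rows[j] L (Sum.inr fv) hlen, hrj]
      simp [List.map_map, Function.comp_def, pyIntOf, pyIntChar]
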